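-- pv_equiv track=rewrite | github.com/daniel-reich/ubiquitous-fiesta | 88WesDgd2Ge9JEiJM_5.py | almost_uniform
-- ===== SOURCE A (Python) =====
-- def almost_uniform(nums):
--
--   Ordered = set(nums)
--   Ordered = sorted(list(Ordered))
--
--   Answer = 0
--
--   First = 0
--   Second = 1
--   Length = len(Ordered)
--
--   while (Second < Length):
--
--     Value_A = Ordered[First]
--     Value_B = Ordered[Second]
--     Difference = Value_B - Value_A
--
--     Score_A = nums.count(Value_A)
--     Score_B = nums.count(Value_B)
--     Total = Score_A + Score_B
--
--     if (Difference != 1):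
--       First += 1
--       Second += 1
--     elif (Total <= Answer):
--       First += 1
--       Second += 1
--     else:
--       Answer = Total
--       First += 1
--       Second += 1
--
--   return Answer
-- ===== SOURCE B (Python) =====
-- def almost_uniform(nums):
--     counts = {}
--     for v in nums:
--         counts[v] = counts.get(v, 0) + 1
--     best = 0
--     for v, c in counts.items():
--         if v + 1 in counts:
--             best = max(best, c + counts[v + 1])
--     return best
-- ===== Notes on version B (the rewrite author's own statement) =====
-- stated objective: faster
-- what changed: B never sorts and never forms adjacent pairs: it builds a frequency dictionary in one pass and, for each distinct value v, probes the dictionary for v+1 directly, taking the max of the two counts' sum; A sorts the unique values and rescans the whole list with nums.count for every adjacent pair.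
import Mathlib
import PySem

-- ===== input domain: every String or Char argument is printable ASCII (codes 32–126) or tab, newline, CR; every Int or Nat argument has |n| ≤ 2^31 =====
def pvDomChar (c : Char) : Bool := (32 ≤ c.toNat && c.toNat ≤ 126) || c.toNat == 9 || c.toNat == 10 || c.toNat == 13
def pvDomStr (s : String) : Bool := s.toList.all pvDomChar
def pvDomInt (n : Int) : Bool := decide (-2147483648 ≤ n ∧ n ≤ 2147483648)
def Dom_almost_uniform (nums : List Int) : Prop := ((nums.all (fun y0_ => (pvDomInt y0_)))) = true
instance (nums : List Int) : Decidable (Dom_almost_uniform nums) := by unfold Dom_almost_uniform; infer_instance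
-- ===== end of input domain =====

-- B drops A's sort-and-adjacent-pair scan entirely: one counting pass over a dictionary,
-- then for each distinct value a direct probe for v+1 (objective: faster).

-- ===== PORT A =====
-- A's while loop over indices First/Second (the loop keeps Second = First + 1)
def almostLoopA (nums ordered : List Int) (first second : Nat) (answer : Int) : Int :=
  if h : second < ordered.length then
    let valueA := PySem.List.pyGetD ordered (first : Int) 0
    let valueB := PySem.List.pyGetD ordered (second : Int) 0
    let difference := valueB - valueA
    let scoreA : Int := nums.count valueA
    let scoreB : Int := nums.count valueB
    let total := scoreA + scoreB
    if difference ≠ 1 then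
      almostLoopA nums ordered (first + 1) (second + 1) answer
    else if total ≤ answer then
      almostLoopA nums ordered (first + 1) (second + 1) answer
    else
      almostLoopA nums ordered (first + 1) (second + 1) total
  else
    answer
termination_by ordered.length - second

def almost_uniform (nums : List Int) : Int :=
  let ordered := PySem.List.sorted (PySem.Set.ofList nums) (fun x => x) false
  almostLoopA nums ordered 0 1 0

-- ===== PORT B =====
def almost_uniform_alt (nums : List Int) : Int :=
  let counts : PySem.Dict Int Int :=
    nums.foldl (fun d v => d.insert v (d.getD v 0 + 1)) PySem.Dict.empty
  counts.items.foldl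
    (fun best p =>
      if counts.contains (p.1 + 1) then max best (p.2 + counts.getD (p.1 + 1) 0) else best) 0

-- ===== PRECONDITION & SPEC =====
def Spec_almost_uniform (nums : List Int) (out : Int) : Prop := out = almost_uniform_alt nums
instance (nums : List Int) (out : Int) : Decidable (Spec_almost_uniform nums out) := by unfold Spec_almost_uniform; infer_instance

-- ===== CLAIM (what is proved, stated in full; the proofs are below) =====
def Claim_equal_almost_uniform : Prop := ∀ (nums : List Int), Dom_almost_uniform nums → Spec_almost_uniform nums (almost_uniform nums)

-- ===== LEMMAS AND PROOFS =====

-- A's index loop (with Second = First + 1) is the fold over adjacent pairs of the suffix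
lemma loopA_eq (nums ordered : List Int) (n : Nat) :
    ∀ first answer, n = ordered.length - first →
    almostLoopA nums ordered first (first + 1) answer =
      ((ordered.drop first).zip (ordered.drop (first + 1))).foldl
        (fun best p => if p.2 - p.1 = 1 then max best ((nums.count p.1 : Int) + (nums.count p.2 : Int)) else best) answer := by
  induction n with
  | zero =>
    intro first answer h
    rw [almostLoopA, dif_neg (by omega), List.drop_eq_nil_of_le (by omega)]
    simp
  | succ m ih =>
    intro first answer h
    by_cases hlt : first + 1 < ordered.length
    · have h0 : first < ordered.length := by omega
      have hd1 : ordered.drop first = ordered[first] :: ordered.drop (first + 1) :=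
        List.drop_eq_getElem_cons h0
      have hd2 : ordered.drop (first + 1) = ordered[first + 1] :: ordered.drop (first + 2) :=
        List.drop_eq_getElem_cons hlt
      have hg1 : PySem.List.pyGetD ordered (first : Int) 0 = ordered[first] := by
        simp [PySem.List.pyGetD_natCast, h0]
      have hg2 : PySem.List.pyGetD ordered ((first : Int) + 1) 0 = ordered[first + 1] := by
        rw [show ((first : Int) + 1) = ((first + 1 : Nat) : Int) by push_cast; ring,
          PySem.List.pyGetD_natCast]
        simp [hlt]
      have hrec : ∀ ans, almostLoopA nums ordered (first + 1) (first + 2) ans =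
          ((ordered[first + 1] :: ordered.drop (first + 2)).zip (ordered.drop (first + 2))).foldl
            (fun best p => if p.2 - p.1 = 1 then max best ((nums.count p.1 : Int) + (nums.count p.2 : Int)) else best) ans := by
        intro ans
        have := ih (first + 1) ans (by omega)
        rw [show first + 1 + 1 = first + 2 from rfl] at this
        rw [this, hd2]
      rw [almostLoopA, dif_pos hlt]
      simp only [Nat.cast_add, Nat.cast_one, hg1, hg2]
      rw [hd1, hd2, List.zip_cons_cons, List.foldl_cons]
      simp only []
      by_cases hdiff : ordered[first + 1] - ordered[first] = 1
      · rw [if_neg (by simp [hdiff]), if_pos hdiff]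
        by_cases htot : ((nums.count ordered[first] : Int) + (nums.count ordered[first + 1] : Int)) ≤ answer
        · rw [if_pos htot, hrec answer, max_eq_left htot]
        · rw [if_neg htot, hrec _, max_eq_right (by omega)]
      · rw [if_pos (by simp [hdiff]), if_neg hdiff, hrec answer]
    · rw [almostLoopA, dif_neg (by omega),
        List.drop_eq_nil_of_le (show ordered.length ≤ first + 1 by omega)]
      simp

-- on a strictly increasing list, the adjacent-pair scan is a per-element probe for v+1
lemma zip_scan_eq_probe (nums : List Int) :
    ∀ (l : List Int), l.Pairwise (· < ·) → ∀ init : Int,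
    (l.zip (l.drop 1)).foldl
      (fun best p => if p.2 - p.1 = 1 then max best ((nums.count p.1 : Int) + (nums.count p.2 : Int)) else best) init =
    l.foldl
      (fun best v => if v + 1 ∈ l then max best ((nums.count v : Int) + (nums.count (v + 1) : Int)) else best) init := by
  intro l
  induction l with
  | nil => intro _ init; simp
  | cons a rest ih =>
    intro hp init
    have hpr : rest.Pairwise (· < ·) := hp.of_cons
    have ha : ∀ x ∈ rest, a < x := fun x hx => List.rel_of_pairwise_cons hp hx
    cases rest with
    | nil =>
      simp only [List.drop, List.zip_nil_right, List.foldl_nil, List.foldl_cons]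
      rw [if_neg (by simp)]
    | cons b t =>
      have hab : a < b := ha b (by simp)
      simp only [List.drop_succ_cons, List.drop_zero, List.zip_cons_cons, List.foldl_cons]
      have hmem : (a + 1 ∈ a :: b :: t) ↔ (b - a = 1) := by
        simp only [List.mem_cons]
        constructor
        · rintro (h1 | h1 | h1)
          · omega
          · omega
          · have h2 : b < a + 1 := List.rel_of_pairwise_cons hpr h1
            omega
        · intro h1; right; left; omega
      have hstep : (if b - a = 1 then max init ((nums.count a : Int) + (nums.count b : Int)) else init)
          = (if a + 1 ∈ a :: b :: t then max init ((nums.count a : Int) + (nums.count (a + 1) : Int)) else init) := by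
        by_cases hd : b - a = 1
        · rw [if_pos hd, if_pos (hmem.mpr hd), show a + 1 = b by omega]
        · rw [if_neg hd, if_neg (fun hm => hd (hmem.mp hm))]
      rw [hstep]
      have := ih hpr (if a + 1 ∈ a :: b :: t then max init ((nums.count a : Int) + (nums.count (a + 1) : Int)) else init)
      rw [show (b :: t).drop 1 = t from rfl] at this
      rw [this]
      apply PySem.List.foldl_congr_mem
      intro acc x hx
      have hx' : a < x := ha x hx
      have : (x + 1 ∈ a :: b :: t) ↔ (x + 1 ∈ b :: t) := by
        simp only [List.mem_cons]
        constructor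
        · rintro (h1 | h1)
          · omega
          · exact h1
        · intro hm; exact Or.inr hm
      by_cases hc : x + 1 ∈ b :: t
      · rw [if_pos (this.mpr hc), if_pos hc]
      · rw [if_neg (fun hm => hc (this.mp hm)), if_neg hc]

-- ===== VERDICT (by name: the statement is the Claim_ definition above) =====
theorem almost_uniform_spec : Claim_equal_almost_uniform := by
  intro nums _
  show almost_uniform nums = almost_uniform_alt nums
  unfold almost_uniform almost_uniform_alt
  simp only [PySem.Dict.foldl_insert_getD_add_one_eq_counter, PySem.Dict.items_counter,
    PySem.Dict.getD_counter, PySem.Dict.contains_counter]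
  set l := PySem.List.sorted (PySem.Set.ofList nums) (fun x => x) false with hl
  have hA := loopA_eq nums l l.length 0 0 (by omega)
  simp only [List.drop_zero] at hA
  rw [hA]
  have hsorted : l.Pairwise (· < ·) := by
    have h1 : l.Pairwise (· ≤ ·) := PySem.List.sorted_pairwise _ _
    have h2 : l.Nodup := (PySem.List.sorted_perm _ _ _).nodup_iff.mpr (PySem.Set.nodup_ofList _)
    exact h1.imp₂ (fun a b hle hne => lt_of_le_of_ne hle hne) h2
  rw [zip_scan_eq_probe nums l hsorted 0]
  rw [List.foldl_map]
  have hperm : l.Perm (PySem.Set.ofList nums) := PySem.List.sorted_perm _ _ _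
  have hcongr : l.foldl
      (fun best v => if v + 1 ∈ l then max best ((nums.count v : Int) + (nums.count (v + 1) : Int)) else best) 0
      = l.foldl
      (fun best v => if nums.contains (v + 1) then max best ((nums.count v : Int) + (nums.count (v + 1) : Int)) else best) 0 := by
    apply PySem.List.foldl_congr_mem
    intro acc x _
    have hiff : (x + 1 ∈ l) ↔ (nums.contains (x + 1) = true) := by
      rw [PySem.List.mem_sorted, PySem.Set.mem_ofList, List.contains_iff_mem]
    by_cases hc : x + 1 ∈ l
    · rw [if_pos hc, if_pos (hiff.mp hc)]
    · rw [if_neg hc, if_neg (fun h => hc (hiff.mpr h))]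
  rw [hcongr]
  exact hperm.foldl_eq
    (rcomm := ⟨by
      intro b a1 a2
      split_ifs <;> simp [max_assoc, max_comm, max_left_comm]⟩) 0
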